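-- pv_equiv track=rewrite | github.com/TheMrguiller/R-3-Detox | src/data/obtain_automatic_metric_ranking.py | generate_ranking_per_evaluation
-- ===== SOURCE A (Python) =====
-- from typing import List
--
-- def generate_ranking_per_evaluation(result:str,model_names:List[str],rank:int):
--     final_result = {}
--     result_base = result.split(" ")
--     result= []
--     for i in range(len(result_base)):
--         result.append(int(result_base[i]))
--     for i in range(len(result)):
--         final_result[model_names[i]] = result[i]
--     sorted_result = sorted(final_result.items(), key=lambda x: x, reverse=False)
--     ranked_result = {}
--     max_value = sorted_result[0][1]
--     for i in range(len(sorted_result)):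
--         if sorted_result[i][1] == max_value:
--             ranked_result[sorted_result[i][0]] = rank
--         else:
--             rank+=1
--             max_value = sorted_result[i][1]
--             ranked_result[sorted_result[i][0]] = rank
--     return ranked_result
-- ===== SOURCE B (Python) =====
-- from typing import List
--
-- def generate_ranking_per_evaluation(result: str, model_names: List[str], rank: int):
--     scores = {}
--     for name, token in zip(model_names, result.split(" ")):
--         scores[name] = int(token)
--     names = sorted(scores)  # keys are unique, so this equals A's (name, value) item order
--     vals = [scores[n] for n in names]
--     return {
--         names[i]: rank + sum(1 for j in range(1, i + 1) if vals[j] != vals[j - 1])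
--         for i in range(len(names))
--     }
-- ===== Notes on version B (the rewrite author's own statement) =====
-- stated objective: alternative
-- what changed: B exploits that dict keys are unique (so A's (name,value) item sort is just a sort of the names), sorts the key set alone, and computes every model's rank independently by a closed-form prefix count of adjacent value changes instead of A's stateful rank/max_value scan.
import Mathlib
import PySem

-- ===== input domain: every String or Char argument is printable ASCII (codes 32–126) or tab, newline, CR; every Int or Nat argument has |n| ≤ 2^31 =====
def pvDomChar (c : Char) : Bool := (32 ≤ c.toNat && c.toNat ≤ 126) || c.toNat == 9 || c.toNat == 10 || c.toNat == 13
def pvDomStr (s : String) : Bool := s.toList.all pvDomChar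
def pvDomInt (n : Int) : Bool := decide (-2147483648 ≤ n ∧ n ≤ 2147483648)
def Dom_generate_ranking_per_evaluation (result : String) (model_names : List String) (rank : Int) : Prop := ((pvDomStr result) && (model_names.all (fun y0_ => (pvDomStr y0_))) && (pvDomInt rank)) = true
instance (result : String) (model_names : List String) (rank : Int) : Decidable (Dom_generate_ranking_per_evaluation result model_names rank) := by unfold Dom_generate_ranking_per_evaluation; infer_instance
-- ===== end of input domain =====

-- B sorts the (unique) key set alone and gives each model a closed-form rank (a prefix count of
-- adjacent value changes) instead of A's item sort plus stateful rank/max_value scan.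


-- ===== PORT A =====
def generate_ranking_per_evaluation (result : String) (model_names : List String) (rank : Int) : List (String × Int) :=
  let result_base := (PySem.Str.split? result " ").getD []          -- result.split(" "); sep ≠ "" so never none
  let resultL := result_base.foldl
      (fun acc t => acc ++ [(PySem.Int.ofStr? t).getD 0]) ([] : List Int)   -- int(t); none (ValueError) excluded by Pre_
  let final_result := (PySem.List.enumerate resultL).foldl
      (fun (d : PySem.Dict String Int) p =>
        d.insert ((PySem.List.pyGet? model_names p.1).getD "") p.2)         -- model_names[i]; none (IndexError) excluded by Pre_
      PySem.Dict.empty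
  let sorted_result := PySem.List.sorted2 final_result.items Prod.fst Prod.snd   -- sorted(items, key=lambda x: x)
  let max_value := ((PySem.List.pyGet? sorted_result 0).getD ("", 0)).2     -- sorted_result[0][1]; [] impossible under Pre_
  let st := sorted_result.foldl
      (fun (st : PySem.Dict String Int × Int × Int) p =>
        if p.2 == st.2.2 then (st.1.insert p.1 st.2.1, st.2.1, st.2.2)
        else (st.1.insert p.1 (st.2.1 + 1), st.2.1 + 1, p.2))
      (PySem.Dict.empty, rank, max_value)
  st.1.items

-- ===== PORT B =====
def generate_ranking_per_evaluation_alt (result : String) (model_names : List String) (rank : Int) : List (String × Int) :=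
  let scores := (model_names.zip ((PySem.Str.split? result " ").getD [])).foldl
      (fun (d : PySem.Dict String Int) p => d.insert p.1 ((PySem.Int.ofStr? p.2).getD 0))
      PySem.Dict.empty                                                     -- for name, token in zip(...): scores[name] = int(token)
  let names := PySem.List.sorted scores.keys (fun x => x)                  -- sorted(scores)
  let vals := names.map (fun n => (scores.get? n).getD 0)                  -- scores[n]; n is a key, KeyError impossible
  ((PySem.List.pyRange 0 (names.length : Int) 1).foldl
      (fun (d : PySem.Dict String Int) i =>
        d.insert (PySem.List.pyGetD names i "")
          (rank + (PySem.List.pyRange 1 (i + 1) 1).foldl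
              (fun acc j => if PySem.List.pyGetD vals j 0 ≠ PySem.List.pyGetD vals (j - 1) 0 then acc + 1 else acc)
              0))
      PySem.Dict.empty).items

-- ===== PRECONDITION & SPEC =====
-- A raises ValueError when a token of result.split(" ") is not an int literal, and IndexError when
-- there are more tokens than model_names; Pre_ excludes exactly those inputs.
def Pre_generate_ranking_per_evaluation (result : String) (model_names : List String) (_rank : Int) : Prop :=
  (∀ t ∈ (PySem.Str.split? result " ").getD [], (PySem.Int.ofStr? t).isSome = true) ∧
  ((PySem.Str.split? result " ").getD []).length ≤ model_names.length
instance (result : String) (model_names : List String) (rank : Int) : Decidable (Pre_generate_ranking_per_evaluation result model_names rank) := by unfold Pre_generate_ranking_per_evaluation; infer_instance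

def pvWitness_generate_ranking_per_evaluation : String × List String × Int := ("3 1 3", ["a", "b", "c"], 1)

def Spec_generate_ranking_per_evaluation (result : String) (model_names : List String) (rank : Int) (out : List (String × Int)) : Prop := out = generate_ranking_per_evaluation_alt result model_names rank
instance (result : String) (model_names : List String) (rank : Int) (out : List (String × Int)) : Decidable (Spec_generate_ranking_per_evaluation result model_names rank out) := by unfold Spec_generate_ranking_per_evaluation; infer_instance

-- ===== CLAIM (what is proved, stated in full; the proofs are below) =====
def Claim_equal_generate_ranking_per_evaluation : Prop := ∀ (result : String) (model_names : List String) (rank : Int), Dom_generate_ranking_per_evaluation result model_names rank → Pre_generate_ranking_per_evaluation result model_names rank → Spec_generate_ranking_per_evaluation result model_names rank (generate_ranking_per_evaluation result model_names rank)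

-- ===== LEMMAS AND PROOFS =====

-- A's second loop (indexed dict build) equals a fold over the zip, given enough names.
lemma pvZip_fold (vals : List Int) : ∀ (pre names : List String) (d : PySem.Dict String Int),
    vals.length ≤ names.length →
    (PySem.List.enumerate vals (pre.length : Int)).foldl
        (fun d p => d.insert ((PySem.List.pyGet? (pre ++ names) p.1).getD "") p.2) d
      = (names.zip vals).foldl (fun d q => d.insert q.1 q.2) d := by
  induction vals with
  | nil =>
    intro pre names d _
    simp [PySem.List.enumerate_nil]
  | cons v vs ih =>
    intro pre names d h
    cases names with
    | nil => simp at h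
    | cons n ns =>
      rw [PySem.List.enumerate_cons]
      simp only [List.foldl_cons, List.zip_cons_cons]
      rw [PySem.List.pyGet?_append_length]
      have h1 : (pre.length : Int) + 1 = (((pre ++ [n]).length : Nat) : Int) := by simp
      have h2 : pre ++ n :: ns = (pre ++ [n]) ++ ns := by simp
      rw [h1, h2]
      simpa using ih (pre ++ [n]) ns _ (by simpa using h)

-- the (name, rank) pairs A's stateful scan emits
def pvScanA : List (String × Int) → Int → Int → List (String × Int)
  | [], _, _ => []
  | p :: rest, rk, mv =>
    if p.2 == mv then (p.1, rk) :: pvScanA rest rk mv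
    else (p.1, rk + 1) :: pvScanA rest (rk + 1) p.2

-- A's ranking fold is: insert the pvScanA pairs in order.
lemma pvA_fold (xs : List (String × Int)) : ∀ (d : PySem.Dict String Int) (rk mv : Int),
    (xs.foldl
        (fun (st : PySem.Dict String Int × Int × Int) p =>
          if p.2 == st.2.2 then (st.1.insert p.1 st.2.1, st.2.1, st.2.2)
          else (st.1.insert p.1 (st.2.1 + 1), st.2.1 + 1, p.2)) (d, rk, mv)).1
      = (pvScanA xs rk mv).foldl (fun d q => d.insert q.1 q.2) d := by
  induction xs with
  | nil => intro d rk mv; rfl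
  | cons p rest ih =>
    intro d rk mv
    by_cases h : p.2 == mv
    · simp only [List.foldl_cons, pvScanA, h, if_true]
      exact ih _ _ _
    · simp only [List.foldl_cons, pvScanA, h]
      exact ih _ _ _

-- the head-recursive form of the scan, seeded with the head's value as max_value
def pvScan2 : (String × Int) → List (String × Int) → Int → List (String × Int)
  | p, [], rk => [(p.1, rk)]
  | p, q :: xs, rk => (p.1, rk) :: pvScan2 q xs (if q.2 == p.2 then rk else rk + 1)

lemma pvScanA_eq_scan2 (xs : List (String × Int)) : ∀ (p : String × Int) (rk : Int),
    (p.1, rk) :: pvScanA xs rk p.2 = pvScan2 p xs rk := by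
  induction xs with
  | nil => intro p rk; rfl
  | cons q rest ih =>
    intro p rk
    by_cases h : q.2 == p.2
    · have h' : q.2 = p.2 := by simpa using h
      simp only [pvScanA, pvScan2, h, if_true]
      rw [← h']
      exact congrArg _ (ih q rk)
    · simp only [pvScanA, h, if_false, pvScan2, Bool.false_eq_true]
      exact congrArg _ (ih q (rk + 1))

-- B's closed form: the number of adjacent value changes among positions 1..i
def pvChg (vals : List Int) : Nat → Int
  | 0 => 0
  | i + 1 => pvChg vals i + (if vals.getD (i + 1) 0 ≠ vals.getD i 0 then 1 else 0)

lemma pvChg_cons (v : Int) (rest : List Int) : ∀ i : Nat,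
    pvChg (v :: rest) (i + 1) = (if rest.getD 0 0 ≠ v then 1 else 0) + pvChg rest i := by
  intro i
  induction i with
  | zero =>
    show pvChg (v :: rest) 0 + _ = _
    simp [pvChg, add_comm]
  | succ i ih =>
    show pvChg (v :: rest) (i + 1) + _ = _
    rw [ih]
    simp only [pvChg, List.getD_cons_succ]
    ring

-- the scan equals the per-index closed form
lemma pvScan2_eq_map (xs : List (String × Int)) : ∀ (p : String × Int) (rk : Int),
    pvScan2 p xs rk
      = (List.range (xs.length + 1)).map
          (fun i => (((p :: xs).map Prod.fst).getD i "", rk + pvChg ((p :: xs).map Prod.snd) i)) := by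
  induction xs with
  | nil => intro p rk; simp [pvScan2, List.range_succ, pvChg]
  | cons q xs ih =>
    intro p rk
    rw [pvScan2, List.range_succ_eq_map]
    simp only [List.map_cons, List.map_map, List.length_cons]
    refine congrArg₂ List.cons ?_ ?_
    · simp [pvChg]
    rw [ih q]
    simp only [List.map_cons]
    refine List.map_congr_left ?_
    intro i _
    simp only [Function.comp, Nat.succ_eq_add_one, List.getD_cons_succ]
    have hc := pvChg_cons p.2 (q.2 :: xs.map Prod.snd) i
    simp only [List.getD_cons_zero] at hc
    rw [hc]
    by_cases h : q.2 == p.2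
    · have h' : q.2 = p.2 := by simpa using h
      have hd : (if q.2 ≠ p.2 then (1 : Int) else 0) = 0 := by simp [h']
      rw [hd, if_pos h]
      exact congrArg (Prod.mk _) (by ring)
    · have h' : ¬ q.2 = p.2 := by simpa using h
      have hd : (if q.2 ≠ p.2 then (1 : Int) else 0) = 1 := by simp [h']
      rw [hd, if_neg h]
      exact congrArg (Prod.mk _) (by ring)

-- B's inner index loop computes pvChg
lemma pvInner_eq_chg (vals : List Int) : ∀ i : Nat,
    (PySem.List.pyRange 1 ((i : Int) + 1) 1).foldl
        (fun acc j => if PySem.List.pyGetD vals j 0 ≠ PySem.List.pyGetD vals (j - 1) 0 then acc + 1 else acc)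
        0
      = pvChg vals i := by
  intro i
  induction i with
  | zero => rw [PySem.List.pyRange_one_eq_nil (by omega)]; rfl
  | succ i ih =>
    have hsp : ((i + 1 : Nat) : Int) + 1 = ((i : Int) + 1) + 1 := by push_cast; ring
    rw [hsp, PySem.List.pyRange_one_succ_right (by omega), List.foldl_append, ih]
    simp only [List.foldl_cons, List.foldl_nil]
    have e1 : (i : Int) + 1 = ((i + 1 : Nat) : Int) := by push_cast; ring
    have e2 : ((i + 1 : Nat) : Int) - 1 = ((i : Nat) : Int) := by push_cast; ring
    rw [e1, e2, PySem.List.pyGetD_natCast, PySem.List.pyGetD_natCast]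
    have hstep : pvChg vals (i + 1)
        = pvChg vals i + (if vals.getD (i + 1) 0 ≠ vals.getD i 0 then 1 else 0) := rfl
    rw [hstep]
    by_cases h : vals.getD (i + 1) 0 = vals.getD i 0
    · rw [if_neg (fun hn => hn h), if_neg (fun hn => hn h)]
      ring
    · rw [if_pos h, if_pos h]

-- insertBy folds agree when the two orderings agree on all elements involved
lemma pvInsertBy_congr {α : Type} (p q : α → α → Bool) (l : List α)
    (h : ∀ a ∈ l, ∀ b ∈ l, p a b = q a b) :
    ∀ (acc : List α) (x : α), x ∈ l → (∀ y ∈ acc, y ∈ l) →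
      PySem.List.insertBy p x acc = PySem.List.insertBy q x acc := by
  intro acc
  induction acc with
  | nil => intro x _ _; rfl
  | cons y ys ih =>
    intro x hx hacc
    have hy : y ∈ l := hacc y (by simp)
    have hpq : p x y = q x y := h x hx y hy
    simp only [PySem.List.insertBy, hpq]
    by_cases hb : q x y
    · simp [hb]
    · simp only [hb, Bool.false_eq_true, if_false]
      rw [ih x hx (fun z hz => hacc z (by simp [hz]))]

lemma pvFoldl_insertBy_congr {α : Type} (p q : α → α → Bool) (l : List α)
    (h : ∀ a ∈ l, ∀ b ∈ l, p a b = q a b) :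
    ∀ (xs acc : List α), (∀ x ∈ xs, x ∈ l) → (∀ y ∈ acc, y ∈ l) →
      xs.foldl (fun acc x => PySem.List.insertBy p x acc) acc
        = xs.foldl (fun acc x => PySem.List.insertBy q x acc) acc := by
  intro xs
  induction xs with
  | nil => intro acc _ _; rfl
  | cons x xs ih =>
    intro acc hxs hacc
    have hx : x ∈ l := hxs x (by simp)
    simp only [List.foldl_cons]
    rw [pvInsertBy_congr p q l h acc x hx hacc]
    exact ih _ (fun z hz => hxs z (by simp [hz]))
      (fun z hz => (PySem.List.mem_insertBy _ _ _ _ |>.mp hz).elim (fun e => e ▸ hx) (hacc z))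

-- when first components are injective on the list, the (fst, snd) tuple sort is the fst sort
lemma pvSorted2_eq_sorted (xs : List (String × Int))
    (hinj : ∀ a ∈ xs, ∀ b ∈ xs, a.1 = b.1 → a = b) :
    PySem.List.sorted2 xs Prod.fst Prod.snd = PySem.List.sorted xs Prod.fst := by
  rw [PySem.List.sorted_eq_foldl_insertBy]
  show xs.foldl (fun acc x => PySem.List.insertBy
      (fun a b => decide (a.1 < b.1) || (!decide (b.1 < a.1) && decide (a.2 < b.2))) x acc) []
    = _
  refine pvFoldl_insertBy_congr _ _ xs ?_ xs [] (fun _ hz => hz) (by simp)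
  intro a ha b hb
  by_cases h1 : a.1 < b.1
  · simp [h1]
  · by_cases h2 : b.1 < a.1
    · simp [h1, h2]
    · have he : a.1 = b.1 := le_antisymm (not_lt.1 h2) (not_lt.1 h1)
      have := hinj a ha b hb he
      subst this
      simp

lemma pvScan2_map_fst : ∀ (xs : List (String × Int)) (p : String × Int) (rk : Int),
    (pvScan2 p xs rk).map Prod.fst = (p :: xs).map Prod.fst := by
  intro xs
  induction xs with
  | nil => intro p rk; rfl
  | cons q xs ih =>
    intro p rk
    simp only [pvScan2, List.map_cons]
    rw [ih q]
    rfl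

-- both ranking loops, applied to the same dict and its sorted key list, emit the same items
lemma pvRank_eq (d : PySem.Dict String Int) (rank : Int) (names : List String) (hnod : names.Nodup) :
    (((names.map (fun k => (k, d.getD k 0))).foldl
        (fun (st : PySem.Dict String Int × Int × Int) p =>
          if p.2 == st.2.2 then (st.1.insert p.1 st.2.1, st.2.1, st.2.2)
          else (st.1.insert p.1 (st.2.1 + 1), st.2.1 + 1, p.2))
        (PySem.Dict.empty, rank,
          ((PySem.List.pyGet? (names.map (fun k => (k, d.getD k 0))) 0).getD ("", 0)).2)).1).items
    = ((PySem.List.pyRange 0 (names.length : Int) 1).foldl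
        (fun (dd : PySem.Dict String Int) i =>
          dd.insert (PySem.List.pyGetD names i "")
            (rank + (PySem.List.pyRange 1 (i + 1) 1).foldl
                (fun acc j =>
                  if PySem.List.pyGetD (names.map (fun n => (d.get? n).getD 0)) j 0
                      ≠ PySem.List.pyGetD (names.map (fun n => (d.get? n).getD 0)) (j - 1) 0
                  then acc + 1 else acc)
                0))
        PySem.Dict.empty).items := by
  cases names with
  | nil =>
    simp [PySem.List.pyRange_one]
  | cons n ns =>
    have hnames : ((n :: ns).map (fun k => (k, d.getD k 0))).map Prod.fst = n :: ns := by
      simp [Function.comp_def]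
    -- LHS: the stateful scan
    rw [List.map_cons, PySem.List.pyGet?_zero_cons, Option.getD_some]
    rw [pvA_fold]
    have hscan : pvScanA ((n, d.getD n 0) :: ns.map (fun k => (k, d.getD k 0))) rank (d.getD n 0)
        = (n, rank) :: pvScanA (ns.map (fun k => (k, d.getD k 0))) rank (d.getD n 0) := by
      simp [pvScanA]
    rw [hscan]
    have hs2 := pvScanA_eq_scan2 (ns.map (fun k => (k, d.getD k 0))) (n, d.getD n 0) rank
    rw [hs2]
    have hnodl : ((pvScan2 (n, d.getD n 0) (ns.map (fun k => (k, d.getD k 0))) rank).map Prod.fst).Nodup := by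
      rw [pvScan2_map_fst]
      simpa [Function.comp_def] using hnod
    rw [PySem.Dict.items_foldl_insert_fresh _ Prod.fst Prod.snd PySem.Dict.empty
      (fun a _ => PySem.Dict.contains_empty _) hnodl]
    -- RHS: the indexed closed form
    have hmapk : (PySem.List.pyRange 0 (((n :: ns).length : Nat) : Int) 1).map
        (fun i => PySem.List.pyGetD (n :: ns) i "") = n :: ns :=
      PySem.List.map_pyGetD_pyRange_zero' (n :: ns) ""
    have hnodr : ((PySem.List.pyRange 0 (((n :: ns).length : Nat) : Int) 1).map
        (fun i => PySem.List.pyGetD (n :: ns) i "")).Nodup := by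
      rw [hmapk]; exact hnod
    rw [PySem.Dict.items_foldl_insert_fresh _ (fun i => PySem.List.pyGetD (n :: ns) i "")
      (fun i => rank + (PySem.List.pyRange 1 (i + 1) 1).foldl
          (fun acc j =>
            if PySem.List.pyGetD ((n :: ns).map (fun n => (d.get? n).getD 0)) j 0
                ≠ PySem.List.pyGetD ((n :: ns).map (fun n => (d.get? n).getD 0)) (j - 1) 0
            then acc + 1 else acc) 0)
      PySem.Dict.empty (fun a _ => PySem.Dict.contains_empty _) hnodr]
    rw [pvScan2_eq_map]
    rw [PySem.List.pyRange_one 0 (((n :: ns).length : Nat) : Int)]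
    simp only [List.map_map, sub_zero, Int.toNat_natCast,
      List.length_map, List.length_cons]
    refine List.map_congr_left ?_
    intro i hi
    simp only [Function.comp, zero_add, PySem.List.pyGetD_natCast]
    have hfst : ((n, d.getD n 0) :: ns.map (fun k => (k, d.getD k 0))).map Prod.fst = n :: ns := by
      simp [Function.comp_def]
    have hsnd : ((n, d.getD n 0) :: ns.map (fun k => (k, d.getD k 0))).map Prod.snd
        = (n :: ns).map (fun k => d.getD k 0) := by
      simp [Function.comp_def]
    have hv : (n :: ns).map (fun n => (d.get? n).getD 0) = (n :: ns).map (fun k => d.getD k 0) := rfl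
    rw [hfst, hsnd, hv, pvInner_eq_chg]

-- ===== VERDICT (by name: the statement is the Claim_ definition above) =====
theorem generate_ranking_per_evaluation_spec : Claim_equal_generate_ranking_per_evaluation := by
  intro result model_names rank _ hpre
  obtain ⟨_, hlen⟩ := hpre
  unfold Spec_generate_ranking_per_evaluation
  unfold generate_ranking_per_evaluation generate_ranking_per_evaluation_alt
  simp only [PySem.List.foldl_append_singleton_eq_map, List.nil_append]
  -- the two dict builds agree
  have hdict :
      (PySem.List.enumerate (((PySem.Str.split? result " ").getD []).map (fun t => (PySem.Int.ofStr? t).getD 0))).foldl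
          (fun (d : PySem.Dict String Int) p => d.insert ((PySem.List.pyGet? model_names p.1).getD "") p.2)
          PySem.Dict.empty
        = (model_names.zip ((PySem.Str.split? result " ").getD [])).foldl
            (fun (d : PySem.Dict String Int) p => d.insert p.1 ((PySem.Int.ofStr? p.2).getD 0))
            PySem.Dict.empty := by
    have hz := pvZip_fold (((PySem.Str.split? result " ").getD []).map (fun t => (PySem.Int.ofStr? t).getD 0))
      [] model_names PySem.Dict.empty (by simpa using hlen)
    simp only [List.nil_append, List.length_nil, Nat.cast_zero] at hz
    rw [hz, List.zip_map_right, List.foldl_map]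
    rfl
  rw [hdict]
  set d := (model_names.zip ((PySem.Str.split? result " ").getD [])).foldl
      (fun (d : PySem.Dict String Int) p => d.insert p.1 ((PySem.Int.ofStr? p.2).getD 0))
      PySem.Dict.empty with hd
  have hnd : d.keys.Nodup :=
    PySem.Dict.nodup_keys_foldl_insert_key _ Prod.fst (fun _ p => (PySem.Int.ofStr? p.2).getD 0) _
      PySem.Dict.nodup_keys_empty
  have hnodnames : (PySem.List.sorted d.keys (fun x => x)).Nodup :=
    ((PySem.List.sorted_perm d.keys (fun x => x) false).nodup_iff).mpr hnd
  have hinj : ∀ a ∈ d.items, ∀ b ∈ d.items, a.1 = b.1 → a = b := by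
    have hk : (d.items.map Prod.fst).Nodup := by
      have : d.keys = d.items.map Prod.fst := by simp [PySem.Dict.keys]
      rwa [this] at hnd
    exact fun a ha b hb he => List.inj_on_of_nodup_map hk ha hb he
  have hsorted : PySem.List.sorted2 d.items Prod.fst Prod.snd
      = (PySem.List.sorted d.keys (fun x => x)).map (fun k => (k, d.getD k 0)) := by
    rw [pvSorted2_eq_sorted d.items hinj]
    refine PySem.List.sorted_eq_of_perm_of_pairwise_lt _ _ _ ?_ ?_
    · rw [PySem.Dict.items_eq_map_keys d hnd 0]
      exact (PySem.List.sorted_perm d.keys (fun x => x) false).map _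
    · have h1 : (PySem.List.sorted d.keys (fun x => x)).Pairwise (· ≤ ·) :=
        PySem.List.sorted_pairwise d.keys (fun x => x)
      have h3 : (PySem.List.sorted d.keys (fun x => x)).Pairwise (· < ·) :=
        (h1.and hnodnames).imp (fun h => lt_of_le_of_ne h.1 h.2)
      exact (List.pairwise_map).mpr h3
  rw [hsorted]
  exact pvRank_eq d rank (PySem.List.sorted d.keys (fun x => x)) hnodnames
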